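-- pv_equiv track=rewrite | github.com/MohammedAlewi/competitive-programming | hacker_rank/google.py | solution
-- ===== SOURCE A (Python) =====
-- def solution(A):
--   row_count=0
--
--   values=set()
--   vals=[]
--   for index in range(len(A)):
--     if index not in values:
--       val=do_dfs(A,index,values)
--       vals.append(val)
--       values=values.union(set(val))
--       row_count+=1
--   return row_count
--
-- def do_dfs(A,index,values):
--   path=[]
--
--   for i in range(index+1,len(A)):
--     if i in values:
--       continue
--
--     if A[index]>A[i]:
--
--       paths=do_dfs(A,i,values)
--
--       if len(path)<len(paths):
--         path=paths
--
--   path.append(index)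
--
--   return path
-- ===== SOURCE B (Python) =====
-- def solution(A):
--     n = len(A)
--     used = set()
--     rows = 0
--     for start in range(n):
--         if start in used:
--             continue
--         # bottom-up DP table: paths[idx] = longest strictly-decreasing chain
--         # starting at idx (first-longest tie-break), avoiding used indices
--         paths = [None] * n
--         for idx in range(n - 1, start - 1, -1):
--             best = []
--             for i in range(idx + 1, n):
--                 if i not in used and A[idx] > A[i] and len(best) < len(paths[i]):
--                     best = paths[i]
--             paths[idx] = best + [idx]
--         used.update(paths[start])
--         rows += 1
--     return rows
-- ===== Notes on version B (the rewrite author's own statement) =====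
-- stated objective: faster
-- what changed: Replaces the exponential top-down do_dfs recursion (recomputed subchains with no sharing) by a per-round bottom-up DP table of longest chains built once from right to left, then counts the same greedy chain-peeling rounds.
import Mathlib
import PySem

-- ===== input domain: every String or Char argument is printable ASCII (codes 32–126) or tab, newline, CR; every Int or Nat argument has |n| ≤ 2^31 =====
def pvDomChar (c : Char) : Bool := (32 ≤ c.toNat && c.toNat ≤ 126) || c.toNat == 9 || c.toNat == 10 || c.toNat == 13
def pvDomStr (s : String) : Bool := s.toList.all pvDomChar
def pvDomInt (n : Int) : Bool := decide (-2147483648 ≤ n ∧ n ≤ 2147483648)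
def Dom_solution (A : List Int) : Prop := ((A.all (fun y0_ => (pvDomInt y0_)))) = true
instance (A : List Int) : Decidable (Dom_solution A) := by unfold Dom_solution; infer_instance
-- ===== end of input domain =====

-- B replaces A's unmemoized top-down do_dfs recursion by a per-round bottom-up DP
-- table of longest chains (objective: faster).

-- ===== PORT A =====
-- do_dfs's inner loop `for i in range(index+1, len(A))`: `path` is the loop
-- accumulator; `d` is the exact number of remaining iterations (= len(A) - i at
-- every call, so the recursion is structural and never truncates); the recursive
-- call do_dfs(A,i,values) appears inline as doDfsAux … i (i+1) d [] ++ [i]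
-- (its own loop runs from i+1 with exactly d = len(A) - (i+1) iterations).
-- All list indexing is in range (index, i ∈ range(len A)), so getD is exact.
def doDfsAux (A : List Int) (values : List Nat) (index : Nat) :
    Nat → Nat → List Nat → List Nat
  | _, 0, path => path
  | i, d+1, path =>
    if i ∈ values then
      doDfsAux A values index (i+1) d path
    else if A.getD index 0 > A.getD i 0 then
      let paths := doDfsAux A values i (i+1) d [] ++ [i]
      if path.length < paths.length then
        doDfsAux A values index (i+1) d paths
      else
        doDfsAux A values index (i+1) d path
    else
      doDfsAux A values index (i+1) d path

def doDfs (A : List Int) (values : List Nat) (index : Nat) : List Nat :=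
  doDfsAux A values index (index+1) (A.length - (index+1)) [] ++ [index]

-- Python's `values` set is kept as the list of indices added so far (membership-
-- equivalent to set.union); `vals` is write-only in A and carries no output.
def solutionLoop (A : List Int) (indices : List Nat) (values : List Nat)
    (rowCount : Int) : Int :=
  match indices with
  | [] => rowCount
  | index :: rest =>
    if index ∈ values then solutionLoop A rest values rowCount
    else
      let val := doDfs A values index
      solutionLoop A rest (values ++ val) (rowCount + 1)

def solution (A : List Int) : Int := solutionLoop A (List.range A.length) [] 0

-- ===== PORT B =====
-- Source B's inner `for i in range(idx+1, n)` scan of the DP table `paths`: the list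
-- `tbl` holds paths[i0], paths[i0+1], …
def bestFrom (A : List Int) (used : List Nat) (idx i0 : Nat) (tbl : List (List Nat))
    (best : List Nat) : List Nat :=
  match tbl with
  | [] => best
  | p :: rest =>
    let best' := if i0 ∉ used ∧ A.getD idx 0 > A.getD i0 0 ∧ best.length < p.length
      then p else best
    bestFrom A used idx (i0+1) rest best'

-- Source B's `for idx in range(n-1, start-1, -1)` table build, bottom-up: d is the
-- exact number of rows still to build (= len(A) - k at every call); tblFrom k is
-- the list [paths[k], paths[k+1], …, paths[n-1]].
def tblFromAux (A : List Int) (used : List Nat) : Nat → Nat → List (List Nat)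
  | _, 0 => []
  | k, d+1 =>
    let rest := tblFromAux A used (k+1) d
    (bestFrom A used k (k+1) rest [] ++ [k]) :: rest

def tblFrom (A : List Int) (used : List Nat) (k : Nat) : List (List Nat) :=
  tblFromAux A used k (A.length - k)

def altLoop (A : List Int) (indices : List Nat) (used : List Nat) (rows : Int) : Int :=
  match indices with
  | [] => rows
  | start :: rest =>
    if start ∈ used then altLoop A rest used rows
    else
      let p := (tblFrom A used start).headD []
      altLoop A rest (used ++ p) (rows + 1)

def solution_alt (A : List Int) : Int := altLoop A (List.range A.length) [] 0

-- ===== PRECONDITION & SPEC =====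
def Spec_solution (A : List Int) (out : Int) : Prop := out = solution_alt A
instance (A : List Int) (out : Int) : Decidable (Spec_solution A out) := by unfold Spec_solution; infer_instance

-- ===== CLAIM (what is proved, stated in full; the proofs are below) =====
def Claim_equal_solution : Prop := ∀ (A : List Int), Dom_solution A → Spec_solution A (solution A)

-- ===== LEMMAS AND PROOFS =====

-- One step of do_dfs's inner loop, with the recursive value written as doDfs.
def chainStep (A : List Int) (values : List Nat) (index : Nat) (path : List Nat)
    (i : Nat) : List Nat :=
  if i ∈ values then path
  else if A.getD index 0 > A.getD i 0 then
    (if path.length < (doDfs A values i).length then doDfs A values i else path)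
  else path

theorem doDfsAux_eq_foldl (A : List Int) (values : List Nat) (index : Nat) :
    ∀ d i path, A.length - i = d →
      doDfsAux A values index i d path =
        (List.range' i d).foldl (chainStep A values index) path := by
  intro d
  induction d with
  | zero => intro i path _; rfl
  | succ d ihd =>
    intro i path hd
    rw [List.range'_succ, List.foldl_cons, doDfsAux]
    have hd' : A.length - (i+1) = d := by omega
    have hstep : (doDfsAux A values i (i+1) d [] ++ [i]) = doDfs A values i := by
      rw [doDfs, hd']
    simp only [chainStep, hstep]
    split_ifs <;> exact ihd (i+1) _ hd'

theorem doDfs_eq_foldl (A : List Int) (values : List Nat) (index : Nat) :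
    doDfs A values index =
      (List.range' (index+1) (A.length - (index+1))).foldl
        (chainStep A values index) [] ++ [index] := by
  rw [doDfs, doDfsAux_eq_foldl A values index (A.length - (index+1)) (index+1) [] rfl]

-- bestFrom over a correct table equals the foldl of chainStep.
theorem bestFrom_eq_foldl (A : List Int) (used : List Nat) (idx : Nat) :
    ∀ (tbl : List (List Nat)) i0 best,
      (∀ k (hk : k < tbl.length), tbl[k] = doDfs A used (i0 + k)) →
      bestFrom A used idx i0 tbl best =
        (List.range' i0 tbl.length).foldl (chainStep A used idx) best := by
  intro tbl
  induction tbl with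
  | nil => intro i0 best _; simp [bestFrom]
  | cons p rest ih =>
    intro i0 best hcorr
    have hp : p = doDfs A used i0 := by
      have := hcorr 0 (by simp)
      simpa using this
    rw [bestFrom, List.length_cons, List.range'_succ, List.foldl_cons]
    have hrest : ∀ k (hk : k < rest.length), rest[k] = doDfs A used ((i0+1) + k) := by
      intro k hk
      have := hcorr (k+1) (by simp; omega)
      simpa [Nat.add_comm, Nat.add_assoc, Nat.add_left_comm] using this
    rw [ih (i0+1) _ hrest]
    congr 1
    subst hp
    simp only [chainStep]
    split_ifs <;> first | rfl | tauto

-- The DP table is correct: it has length n - k and entry j of tblFrom k is doDfs (k+j).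
theorem tblFromAux_spec (A : List Int) (used : List Nat) :
    ∀ d k, A.length - k = d →
      (tblFromAux A used k d).length = d ∧
      ∀ j (hj : j < (tblFromAux A used k d).length),
        (tblFromAux A used k d)[j] = doDfs A used (k + j) := by
  intro d
  induction d with
  | zero =>
    intro k _
    exact ⟨rfl, by intro j hj; simp [tblFromAux] at hj⟩
  | succ d ihd =>
    intro k hd
    obtain ⟨hlen, hent⟩ := ihd (k+1) (by omega)
    have hhead : bestFrom A used k (k+1) (tblFromAux A used (k+1) d) [] ++ [k]
        = doDfs A used k := by
      rw [bestFrom_eq_foldl A used k _ (k+1) [] hent, hlen,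
        (by omega : d = A.length - (k+1)), doDfs_eq_foldl]
    rw [tblFromAux]
    refine ⟨by simpa using hlen, ?_⟩
    intro j hj
    match j with
    | 0 => simpa using hhead
    | Nat.succ j' =>
      simp only [List.getElem_cons_succ]
      have := hent j' (by simpa using hj)
      rw [this]
      congr 1
      omega

theorem headD_tblFrom (A : List Int) (used : List Nat) (k : Nat) (hk : k < A.length) :
    (tblFrom A used k).headD [] = doDfs A used k := by
  obtain ⟨hlen, hent⟩ := tblFromAux_spec A used (A.length - k) k rfl
  rw [tblFrom]
  have h0 : 0 < (tblFromAux A used k (A.length - k)).length := by omega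
  have h00 := hent 0 h0
  cases htb : tblFromAux A used k (A.length - k) with
  | nil => rw [htb] at h0; simp at h0
  | cons a t =>
    simp only [htb, List.getElem_cons_zero] at h00
    simpa using h00

theorem loops_eq (A : List Int) :
    ∀ l values rows, (∀ x ∈ l, x < A.length) →
      solutionLoop A l values rows = altLoop A l values rows := by
  intro l
  induction l with
  | nil => intro v r _; rfl
  | cons x rest ih =>
    intro v r hall
    have hx : x < A.length := hall x (by simp)
    have hrest : ∀ y ∈ rest, y < A.length := fun y hy => hall y (by simp [hy])
    rw [solutionLoop, altLoop]
    by_cases hc : x ∈ v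
    · rw [if_pos hc, if_pos hc]
      exact ih v r hrest
    · rw [if_neg hc, if_neg hc]
      show solutionLoop A rest (v ++ doDfs A v x) (r + 1) =
        altLoop A rest (v ++ (tblFrom A v x).headD []) (r + 1)
      rw [headD_tblFrom A v x hx]
      exact ih _ _ hrest

-- ===== VERDICT (by name: the statement is the Claim_ definition above) =====
theorem solution_spec : Claim_equal_solution := by
  intro A _
  unfold Spec_solution solution solution_alt
  exact loops_eq A _ [] 0 (by intro x hx; simpa using List.mem_range.mp hx)
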